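-- pv_equiv track=rewrite | github.com/jasonwaseq/tiny-npu | test/test.py | output_layer
-- ===== SOURCE A (Python) =====
-- OUTPUT_MASKS = [
--     0b11001010,
--     0b10110100,
--     0b01101100,
--     0b10010111,
-- ]
--
-- def popcount_matches(a: int, b: int) -> int:
--     score = 0
--     for bit in range(8):
--         score += int(((a >> bit) & 1) == ((b >> bit) & 1))
--     return score
--
-- def output_layer(hidden_bits: int):
--     scores = []
--     for mask in OUTPUT_MASKS:
--         scores.append(popcount_matches(hidden_bits, mask))
--
--     class_index = 0
--     confidence = scores[0]
--     for index in range(1, 4):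
--         if scores[index] >= confidence:
--             class_index = index
--             confidence = scores[index]
--     return class_index, confidence, scores
-- ===== SOURCE B (Python) =====
-- OUTPUT_MASKS = [
--     0b11001010,
--     0b10110100,
--     0b01101100,
--     0b10010111,
-- ]
--
-- def output_layer(hidden_bits: int):
--     h = hidden_bits % 256
--     scores = [8 - (h ^ m).bit_count() for m in OUTPUT_MASKS]
--     confidence = max(scores)
--     class_index = 3 - scores[::-1].index(confidence)
--     return class_index, confidence, scores
-- ===== Notes on version B (the rewrite author's own statement) =====
-- stated objective: simpler
-- what changed: B replaces the per-bit comparison loop by a closed-form score (bit-width minus the popcount of (hidden_bits mod 256) XOR mask) and the running >=-argmax loop by max(scores) plus a reversed-list index lookup (same last-maximal-index tie-breaking).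
import Mathlib
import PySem

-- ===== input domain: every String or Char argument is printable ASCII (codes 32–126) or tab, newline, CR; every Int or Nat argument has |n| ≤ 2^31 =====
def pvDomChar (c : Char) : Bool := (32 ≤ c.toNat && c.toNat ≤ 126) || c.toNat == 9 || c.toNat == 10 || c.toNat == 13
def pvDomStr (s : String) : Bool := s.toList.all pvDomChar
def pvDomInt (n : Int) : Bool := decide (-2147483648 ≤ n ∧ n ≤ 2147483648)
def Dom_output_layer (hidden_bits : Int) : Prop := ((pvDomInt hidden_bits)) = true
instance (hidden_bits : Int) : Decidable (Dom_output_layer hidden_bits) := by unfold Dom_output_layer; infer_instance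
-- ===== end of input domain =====

-- B replaces the per-bit comparison loop by a closed-form XOR + bit_count score and the
-- running argmax loop by max() plus a reversed-index lookup (last maximal index); objective: simpler.

-- ===== PORT A =====
def OUTPUT_MASKS : List Int := [0b11001010, 0b10110100, 0b01101100, 0b10010111]

-- for bit in range(8): score += int(((a >> bit) & 1) == ((b >> bit) & 1))
-- bit is a nonnegative Int from range(8); .toNat is exact there.
def popcount_matches (a b : Int) : Int :=
  (PySem.List.pyRange 0 8 1).foldl
    (fun score bit =>
      score + (if PySem.Int.band (a >>> bit.toNat) 1 = PySem.Int.band (b >>> bit.toNat) 1 then 1 else 0))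
    0

def output_layer (hidden_bits : Int) : Int × Int × List Int :=
  let scores := OUTPUT_MASKS.foldl (fun sc mask => sc ++ [popcount_matches hidden_bits mask]) []
  -- scores has length 4, so every scores[index] access is in range (default never used)
  let init : Int × Int := (0, PySem.List.pyGetD scores 0 0)
  let res := (PySem.List.pyRange 1 4 1).foldl
    (fun (st : Int × Int) index =>
      if st.2 ≤ PySem.List.pyGetD scores index 0 then (index, PySem.List.pyGetD scores index 0) else st)
    init
  (res.1, res.2, scores)

-- ===== PORT B =====
-- scores[::-1].index(confidence): confidence = max(scores) is always a member, so index? is some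
def output_layer_alt (hidden_bits : Int) : Int × Int × List Int :=
  let h := PySem.Int.mod hidden_bits 256
  let scores := OUTPUT_MASKS.map (fun m => 8 - (PySem.Int.bitCount (PySem.Int.bxor h m) : Int))
  let confidence := (PySem.List.max? scores (fun x => x)).getD 0
  let class_index := 3 - (((PySem.List.slice? scores none none (-1)).getD []
                            |> (PySem.List.index? · confidence)).getD 0 : Int)
  (class_index, confidence, scores)

-- ===== PRECONDITION & SPEC =====
def Spec_output_layer (hidden_bits : Int) (out : Int × Int × List Int) : Prop := out = output_layer_alt hidden_bits
instance (hidden_bits : Int) (out : Int × Int × List Int) : Decidable (Spec_output_layer hidden_bits out) := by unfold Spec_output_layer; infer_instance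

-- ===== CLAIM (what is proved, stated in full; the proofs are below) =====
def Claim_equal_output_layer : Prop := ∀ (hidden_bits : Int), Dom_output_layer hidden_bits → Spec_output_layer hidden_bits (output_layer hidden_bits)

-- ===== LEMMAS AND PROOFS =====

theorem mod256_idem (a : Int) :
    PySem.Int.mod (PySem.Int.mod a 256) 256 = PySem.Int.mod a 256 := by
  simp only [PySem.Int.mod_eq_emod_of_pos (by norm_num : (0:Int) < 256)]
  exact Int.emod_emod_of_dvd a dvd_rfl

-- low bit of a >> k only depends on a mod 256, for k < 8
theorem bit_mod256 (a : Int) (k : Nat) (hk : k < 8) :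
    PySem.Int.band (a >>> ((k:Nat):Int)) 1 = PySem.Int.band ((PySem.Int.mod a 256) >>> ((k:Nat):Int)) 1 := by
  rw [Int.shiftRight_natCast_right, Int.shiftRight_natCast_right,
      PySem.Int.band_one, PySem.Int.band_one,
      PySem.Int.mod_eq_emod_of_pos (by norm_num : (0:Int) < 2),
      PySem.Int.mod_eq_emod_of_pos (by norm_num : (0:Int) < 2),
      PySem.Int.mod_eq_emod_of_pos (by norm_num : (0:Int) < 256),
      Int.shiftRight_eq_div_pow, Int.shiftRight_eq_div_pow]
  interval_cases k <;> push_cast <;> omega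

theorem popcount_mod256 (a b : Int) :
    popcount_matches a b = popcount_matches (PySem.Int.mod a 256) b := by
  simp only [popcount_matches]
  rw [show PySem.List.pyRange 0 8 1 = [0,1,2,3,4,5,6,7] from by decide]
  simp only [List.foldl]
  rw [bit_mod256 a ((0:Int).toNat) (by decide), bit_mod256 a ((1:Int).toNat) (by decide),
      bit_mod256 a ((2:Int).toNat) (by decide), bit_mod256 a ((3:Int).toNat) (by decide),
      bit_mod256 a ((4:Int).toNat) (by decide), bit_mod256 a ((5:Int).toNat) (by decide),
      bit_mod256 a ((6:Int).toNat) (by decide), bit_mod256 a ((7:Int).toNat) (by decide)]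

theorem outA_mod256 (a : Int) :
    output_layer a = output_layer (PySem.Int.mod a 256) := by
  simp only [output_layer, OUTPUT_MASKS, List.foldl]
  rw [popcount_mod256 a 202, popcount_mod256 a 180, popcount_mod256 a 108, popcount_mod256 a 151]

theorem outB_mod256 (a : Int) :
    output_layer_alt a = output_layer_alt (PySem.Int.mod a 256) := by
  simp only [output_layer_alt, mod256_idem a]

set_option maxRecDepth 10000 in
theorem small_agree : ∀ n : Nat, n < 256 → output_layer (n : Int) = output_layer_alt (n : Int) := by
  decide

-- ===== VERDICT (by name: the statement is the Claim_ definition above) =====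
theorem output_layer_spec : Claim_equal_output_layer := by
  intro a _
  unfold Spec_output_layer
  have h0 : (0:Int) < 256 := by norm_num
  have h1 := PySem.Int.mod_nonneg a h0
  have h2 := PySem.Int.mod_lt a h0
  obtain ⟨n, hn⟩ : ∃ n : Nat, PySem.Int.mod a 256 = (n : Int) :=
    ⟨(PySem.Int.mod a 256).toNat, (Int.toNat_of_nonneg h1).symm⟩
  have hlt : n < 256 := by omega
  rw [outA_mod256, outB_mod256, hn, small_agree n hlt]
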